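-- pv_equiv track=rewrite | github.com/kenoharada/Rubric | codes/rubric_analysis/make_pattern_highlight_on_rubric.py | split_line_segments
-- ===== SOURCE A (Python) =====
-- def split_line_segments(line_text: str, line_colors: list):
--     """行テキストを (text, color_or_None) セグメントに分割。"""
--     if not line_text:
--         return [("", None)]
--     # 色配列が短い場合はパディング
--     lc = list(line_colors)
--     if len(lc) < len(line_text):
--         lc += [None] * (len(line_text) - len(lc))
--     segments = []
--     curr_color = lc[0]
--     curr_text = ""
--     for ch, col in zip(line_text, lc):
--         if col == curr_color:
--             curr_text += ch
--         else:
--             if curr_text: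
--                 segments.append((curr_text, curr_color))
--             curr_color = col
--             curr_text = ch
--     if curr_text:
--         segments.append((curr_text, curr_color))
--     return segments
-- ===== SOURCE B (Python) =====
-- def split_line_segments(line_text: str, line_colors: list):
--     """Two-pointer boundary scan: for each run start i, advance j to the end of
--     the maximal same-color run, then emit the slice (line_text[i:j], lc[i])."""
--     if not line_text:
--         return [("", None)]
--     n = len(line_text)
--     lc = (list(line_colors) + [None] * n)[:n]
--     segments = []
--     i = 0
--     while i < n:
--         color = lc[i]
--         j = i + 1
--         while j < n and lc[j] == color:
--             j += 1
--         segments.append((line_text[i:j], color))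
--         i = j
--     return segments
-- ===== Notes on version B (the rewrite author's own statement) =====
-- stated objective: alternative
-- what changed: Replaced A's single-pass per-character state machine (accumulating curr_text/curr_color and flushing on color change) by maximal-run extraction: pad/truncate the color list once, then repeatedly scan the length of the leading same-color run of the (char, color) pairs and slice off one segment per run.
import Mathlib
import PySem

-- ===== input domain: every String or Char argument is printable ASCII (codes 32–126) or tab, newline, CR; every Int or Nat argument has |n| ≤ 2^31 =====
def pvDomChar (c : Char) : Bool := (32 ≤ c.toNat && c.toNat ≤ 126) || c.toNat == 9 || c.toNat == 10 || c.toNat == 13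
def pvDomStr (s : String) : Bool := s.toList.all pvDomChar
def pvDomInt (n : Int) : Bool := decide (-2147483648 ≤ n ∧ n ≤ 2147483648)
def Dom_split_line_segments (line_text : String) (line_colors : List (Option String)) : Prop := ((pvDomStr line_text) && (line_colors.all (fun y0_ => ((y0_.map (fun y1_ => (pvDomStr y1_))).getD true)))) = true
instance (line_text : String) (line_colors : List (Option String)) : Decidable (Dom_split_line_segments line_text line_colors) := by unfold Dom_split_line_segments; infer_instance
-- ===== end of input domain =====

-- B replaces A's per-character state machine by maximal-run extraction (scan the leading
-- same-color run, slice it off, repeat); objective: alternative decomposition, not faster.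

-- ===== PORT A =====
-- one step of A's for-loop; state = (segments, curr_color, curr_text as List Char)
def pvFoldA (st : List (String × Option String) × Option String × List Char)
    (p : Char × Option String) : List (String × Option String) × Option String × List Char :=
  if p.2 == st.2.1 then (st.1, st.2.1, st.2.2 ++ [p.1])
  else
    ((if st.2.2.isEmpty then st.1 else st.1 ++ [(String.ofList st.2.2, st.2.1)]), p.2, [p.1])

def split_line_segments (line_text : String) (line_colors : List (Option String)) : List (String × Option String) :=
  let chars := line_text.toList
  if chars.isEmpty then [("", none)]
  else
    let lc := if line_colors.length < chars.length
              then line_colors ++ List.replicate (chars.length - line_colors.length) none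
              else line_colors
    -- lc[0]: lc is nonempty here, so headD is exact
    let st := (chars.zip lc).foldl pvFoldA ([], lc.headD none, [])
    if st.2.2.isEmpty then st.1 else st.1 ++ [(String.ofList st.2.2, st.2.1)]

-- ===== PORT B =====
-- B's inner while: advance j while lc[j] == color (indices stay in range, so getD is exact)
def pvRunEnd (lc : List (Option String)) (color : Option String) (n j : Nat) : Nat :=
  if j < n then
    if lc.getD j none == color then pvRunEnd lc color n (j + 1) else j
  else j
termination_by n - j

-- j ≤ pvRunEnd lc color n j (termination helper for the outer loop)
theorem le_pvRunEnd (lc : List (Option String)) (color : Option String) (n j : Nat) :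
    j ≤ pvRunEnd lc color n j := by
  rw [pvRunEnd]
  split_ifs with h1 h2
  · exact le_trans (Nat.le_succ j) (le_pvRunEnd lc color n (j + 1))
  · exact le_refl j
  · exact le_refl j
termination_by n - j

-- B's outer while: emit (line_text[i:j], lc[i]) per run; the slice i:j (0 ≤ i ≤ j) is drop i/take (j-i), exact here
def pvLoopB (chars : List Char) (lc : List (Option String)) (n i : Nat) : List (String × Option String) :=
  if i < n then
    -- color = lc[i]; j = end of the run starting at i (locals of the Python loop body, inlined)
    (String.ofList ((chars.drop i).take (pvRunEnd lc (lc.getD i none) n (i + 1) - i)), lc.getD i none)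
      :: pvLoopB chars lc n (pvRunEnd lc (lc.getD i none) n (i + 1))
  else []
termination_by n - i
decreasing_by
  have := le_pvRunEnd lc (lc.getD i none) n (i + 1)
  omega

def split_line_segments_alt (line_text : String) (line_colors : List (Option String)) : List (String × Option String) :=
  let chars := line_text.toList
  if chars.isEmpty then [("", none)]
  else
    let lc := (line_colors ++ List.replicate chars.length none).take chars.length
    pvLoopB chars lc chars.length 0

-- ===== PRECONDITION & SPEC =====
def Spec_split_line_segments (line_text : String) (line_colors : List (Option String)) (out : List (String × Option String)) : Prop := out = split_line_segments_alt line_text line_colors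
instance (line_text : String) (line_colors : List (Option String)) (out : List (String × Option String)) : Decidable (Spec_split_line_segments line_text line_colors out) := by unfold Spec_split_line_segments; infer_instance

-- ===== CLAIM (what is proved, stated in full; the proofs are below) =====
def Claim_equal_split_line_segments : Prop := ∀ (line_text : String) (line_colors : List (Option String)), Dom_split_line_segments line_text line_colors → Spec_split_line_segments line_text line_colors (split_line_segments line_text line_colors)

-- ===== LEMMAS AND PROOFS =====

-- proof-side canonical form: the list of maximal same-color runs of the zipped (char, color) list
def pvRunsB : List (Char × Option String) → List (String × Option String)
  | [] => []
  | (c, col) :: rest =>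
      (String.ofList (c :: (rest.takeWhile (fun p => p.2 == col)).map Prod.fst), col)
        :: pvRunsB (rest.dropWhile (fun p => p.2 == col))
termination_by l => l.length
decreasing_by
  simp only [List.length_cons]
  exact Nat.lt_succ_of_le (List.length_dropWhile_le _ _)

-- unfolding equations for pvRunsB (well-founded recursion: rw [pvRunsB] is unavailable)
theorem pvRunsB_nil : pvRunsB [] = [] := by rw [pvRunsB.eq_def]
theorem pvRunsB_cons (c : Char) (col : Option String) (rest : List (Char × Option String)) :
    pvRunsB ((c, col) :: rest) =
      (String.ofList (c :: (rest.takeWhile (fun p => p.2 == col)).map Prod.fst), col)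
        :: pvRunsB (rest.dropWhile (fun p => p.2 == col)) := by rw [pvRunsB.eq_def]

-- A's final flush of the loop state
def pvFinishA (st : List (String × Option String) × Option String × List Char) : List (String × Option String) :=
  if st.2.2.isEmpty then st.1 else st.1 ++ [(String.ofList st.2.2, st.2.1)]

-- zip only consumes the first l.length entries of the second list
theorem zip_take_len {α β : Type} (l : List α) (l' : List β) :
    l.zip l' = l.zip (l'.take l.length) := by
  induction l generalizing l' with
  | nil => simp
  | cons a l ih =>
    cases l' with
    | nil => simp
    | cons b l' => simpa using ih l'

-- the loop invariant: flushing A's fold from a state with nonempty curr_text yields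
-- the pending segment merged with the leading matching run, then B's runs of the rest
theorem foldA_runs (ps : List (Char × Option String))
    (segs : List (String × Option String)) (col : Option String) (txt : List Char)
    (h : txt ≠ []) :
    pvFinishA (ps.foldl pvFoldA (segs, col, txt)) =
      segs ++ (String.ofList (txt ++ (ps.takeWhile (fun p => p.2 == col)).map Prod.fst), col)
        :: pvRunsB (ps.dropWhile (fun p => p.2 == col)) := by
  induction ps generalizing segs col txt with
  | nil => simp [pvFinishA, h, pvRunsB_nil]
  | cons p rest ih =>
    obtain ⟨c, k⟩ := p
    by_cases hk : (k == col) = true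
    · have : (pvFoldA (segs, col, txt) (c, k)) = (segs, col, txt ++ [c]) := by
        simp [pvFoldA, hk]
      rw [List.foldl_cons, this, ih segs col (txt ++ [c]) (by simp)]
      simp [hk]
    · have hne : txt.isEmpty = false := by simpa using h
      have : (pvFoldA (segs, col, txt) (c, k)) =
          (segs ++ [(String.ofList txt, col)], k, [c]) := by
        simp [pvFoldA, hk, hne]
      rw [List.foldl_cons, this, ih _ k [c] (by simp)]
      have ht : List.takeWhile (fun p => p.2 == col) ((c, k) :: rest) = [] := by
        simp [hk]
      have hd : List.dropWhile (fun p => p.2 == col) ((c, k) :: rest) = (c, k) :: rest := by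
        simp [hk]
      rw [ht, hd, pvRunsB_cons]
      simp

-- A's padded color list and B's pad-then-truncate yield the same zipped list
theorem zip_pad_eq (chars : List Char) (cols : List (Option String)) :
    chars.zip (if cols.length < chars.length
               then cols ++ List.replicate (chars.length - cols.length) none
               else cols)
    = chars.zip ((cols ++ List.replicate chars.length none).take chars.length) := by
  split_ifs with hlt
  · rw [List.take_append, List.take_replicate, List.take_of_length_le (by omega),
      Nat.min_eq_left (by omega)]
  · rw [zip_take_len, List.take_append, List.take_replicate]
    have h0 : chars.length - cols.length = 0 := by omega
    simp [h0]

-- pvRunEnd stays ≤ n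
theorem pvRunEnd_le (lc : List (Option String)) (color : Option String) (n j : Nat)
    (h : j ≤ n) : pvRunEnd lc color n j ≤ n := by
  rw [pvRunEnd]
  split_ifs with h1 h2
  · exact pvRunEnd_le lc color n (j + 1) h1
  · exact h
  · exact h
termination_by n - j

-- pvRunEnd counts exactly the leading matching colors from position j
theorem pvRunEnd_spec (lc : List (Option String)) (color : Option String) (n j : Nat)
    (hlen : lc.length = n) (h : j ≤ n) :
    pvRunEnd lc color n j = j + ((lc.drop j).takeWhile (fun o => o == color)).length := by
  rw [pvRunEnd]
  split_ifs with h1 h2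
  · have hj : j < lc.length := by omega
    rw [pvRunEnd_spec lc color n (j + 1) hlen (by omega),
      List.drop_eq_getElem_cons hj, List.takeWhile_cons]
    rw [List.getD_eq_getElem lc none hj] at h2
    simp [h2]
    omega
  · have hj : j < lc.length := by omega
    rw [List.drop_eq_getElem_cons hj, List.takeWhile_cons]
    rw [List.getD_eq_getElem lc none hj] at h2
    simp [h2]
  · have : lc.drop j = [] := List.drop_eq_nil_of_le (by omega)
    simp [this]
termination_by n - j

-- the chars of the zipped list's leading matching run are a take of the char list
theorem zip_takeWhile_map_fst (xs : List Char) (ys : List (Option String)) (l : Option String) :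
    ((xs.zip ys).takeWhile (fun p => p.2 == l)).map Prod.fst
      = xs.take ((ys.takeWhile (fun o => o == l)).length) := by
  induction xs generalizing ys with
  | nil => simp
  | cons x xs ih =>
    cases ys with
    | nil => simp
    | cons y ys =>
      by_cases hy : (y == l) = true
      · simp [hy, ih ys]
      · simp [hy]

-- dropping the zipped list's leading matching run = dropping its length from both lists
theorem zip_dropWhile_eq (xs : List Char) (ys : List (Option String)) (l : Option String) :
    (xs.zip ys).dropWhile (fun p => p.2 == l)
      = (xs.drop ((ys.takeWhile (fun o => o == l)).length)).zip
          (ys.drop ((ys.takeWhile (fun o => o == l)).length)) := by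
  induction xs generalizing ys with
  | nil => simp
  | cons x xs ih =>
    cases ys with
    | nil => simp
    | cons y ys =>
      by_cases hy : (y == l) = true
      · simp [hy, ih ys]
      · simp [hy]

-- B's index loop computes the runs of the zipped suffix starting at i
theorem pvLoopB_eq_runs (chars : List Char) (lc : List (Option String)) (n i : Nat)
    (hc : chars.length = n) (hl : lc.length = n) (h : i ≤ n) :
    pvLoopB chars lc n i = pvRunsB ((chars.drop i).zip (lc.drop i)) := by
  rw [pvLoopB]
  split_ifs with hi
  · have hic : i < chars.length := by omega
    have hil : i < lc.length := by omega
    set t := ((lc.drop (i + 1)).takeWhile (fun o => o == lc[i])).length with ht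
    have hgd : lc.getD i none = lc[i] := List.getD_eq_getElem lc none hil
    have hre : pvRunEnd lc (lc.getD i none) n (i + 1) = (i + 1) + t := by
      rw [hgd, pvRunEnd_spec lc lc[i] n (i + 1) hl (by omega)]
    have hrle : (i + 1) + t ≤ n := by
      rw [← hre]; exact pvRunEnd_le lc (lc.getD i none) n (i + 1) (by omega)
    rw [List.drop_eq_getElem_cons hic, List.drop_eq_getElem_cons hil,
      List.zip_cons_cons, pvRunsB_cons]
    rw [hre, hgd]
    have hstep : i + 1 + t - i = t + 1 := by omega
    rw [hstep, List.take_succ_cons, zip_takeWhile_map_fst, zip_dropWhile_eq, ← ht]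
    rw [List.drop_drop, List.drop_drop]
    rw [pvLoopB_eq_runs chars lc n ((i + 1) + t) hc hl hrle]
  · rw [List.drop_eq_nil_of_le (show chars.length ≤ i by omega)]
    simp [pvRunsB_nil]
termination_by n - i
decreasing_by omega

theorem split_line_segments_eq (line_text : String) (line_colors : List (Option String)) :
    split_line_segments line_text line_colors = split_line_segments_alt line_text line_colors := by
  unfold split_line_segments split_line_segments_alt
  cases hchars : line_text.toList with
  | nil => simp
  | cons c0 cs =>
    simp only [List.isEmpty_cons, if_neg Bool.false_ne_true]
    set lcA := if line_colors.length < (c0 :: cs).length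
               then line_colors ++ List.replicate ((c0 :: cs).length - line_colors.length) none
               else line_colors with hlcA
    have hzip : (c0 :: cs).zip lcA
        = (c0 :: cs).zip ((line_colors ++ List.replicate (c0 :: cs).length none).take (c0 :: cs).length) :=
      zip_pad_eq (c0 :: cs) line_colors
    have hA_ne : lcA ≠ [] := by
      rw [hlcA]; split_ifs with hlt
      · simp only [List.length_cons] at hlt
        intro hc
        have := congrArg List.length hc
        simp at this
        omega
      · simp only [List.length_cons, Nat.not_lt] at hlt
        intro hc
        simp [hc] at hlt
    have hlcB : ((line_colors ++ List.replicate (c0 :: cs).length none).take (c0 :: cs).length).length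
        = (c0 :: cs).length := by
      rw [List.length_take]
      simp
    rw [pvLoopB_eq_runs (c0 :: cs) _ (c0 :: cs).length 0 rfl hlcB (by omega), List.drop_zero,
      List.drop_zero, ← hzip]
    obtain ⟨l0, ls, hls⟩ := List.exists_cons_of_ne_nil hA_ne
    rw [hls]
    have h1 : pvFoldA ([], l0, []) (c0, l0) = ([], l0, [c0]) := by
      simp [pvFoldA]
    rw [List.zip_cons_cons, List.headD_cons, List.foldl_cons, h1]
    have := foldA_runs (cs.zip ls) [] l0 [c0] (by simp)
    rw [pvFinishA] at this
    rw [this, pvRunsB_cons]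
    simp

-- ===== VERDICT (by name: the statement is the Claim_ definition above) =====
theorem split_line_segments_spec : Claim_equal_split_line_segments := by
  intro line_text line_colors _
  unfold Spec_split_line_segments
  exact split_line_segments_eq line_text line_colors
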